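-- pv_equiv track=rewrite | github.com/SriramV739/CP | USACO/Winter 2022 Silver/Contest/Bronze/2018December/backforth1.py | oppsum
-- ===== SOURCE A (Python) =====
-- def oppsum(arr):
--     pos=False
--     count=0
--     for i in arr:
--         if pos:
--             pos=False
--             count+=i
--         else:
--             pos=True
--             count-=i
--     return(count)
-- ===== SOURCE B (Python) =====
-- def oppsum(arr):
--     it = iter(arr)
--     total = sum(b - a for a, b in zip(it, it))
--     return total - arr[-1] if len(arr) % 2 else total
-- ===== Notes on version B (the rewrite author's own statement) =====
-- stated objective: alternative
-- what changed: Replaces the boolean parity-flag accumulator loop with a pair-chunked computation: zip the iterator with itself to sum b - a over consecutive pairs, then subtract the unpaired last element when the length is odd.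
import Mathlib
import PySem

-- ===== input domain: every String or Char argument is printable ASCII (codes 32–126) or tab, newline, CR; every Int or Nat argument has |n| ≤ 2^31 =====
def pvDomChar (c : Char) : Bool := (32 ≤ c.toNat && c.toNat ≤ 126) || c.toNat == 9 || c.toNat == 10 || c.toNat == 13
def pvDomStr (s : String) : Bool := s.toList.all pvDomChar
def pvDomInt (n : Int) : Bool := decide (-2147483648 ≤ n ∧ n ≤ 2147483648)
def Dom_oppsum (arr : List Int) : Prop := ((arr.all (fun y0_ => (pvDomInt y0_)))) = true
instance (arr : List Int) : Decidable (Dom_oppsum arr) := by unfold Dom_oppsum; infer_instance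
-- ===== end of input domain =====

-- B replaces the per-element parity-flag loop with a pair-chunked sum (b - a per pair, odd tail subtracted): an alternative decomposition of the same O(n) task.
-- ===== PORT A =====
-- A: parity-flag loop, transcribed as a tail recursion over (pos, count)
def oppsumLoop (arr : List Int) (pos : Bool) (count : Int) : Int :=
  match arr with
  | [] => count
  | i :: rest =>
    if pos then oppsumLoop rest false (count + i)
    else oppsumLoop rest true (count - i)

def oppsum (arr : List Int) : Int := oppsumLoop arr false 0

-- ===== PORT B =====
-- B: zip(it, it) chunks the list into consecutive pairs; sum b - a over the pairs,
-- then subtract the unpaired last element when the length is odd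
def pvPairs : List Int → List (Int × Int)
  | a :: b :: rest => (a, b) :: pvPairs rest
  | _ => []

def oppsum_alt (arr : List Int) : Int :=
  let total := ((pvPairs arr).map (fun p => p.2 - p.1)).sum
  if arr.length % 2 = 1 then total - (PySem.List.pyGet? arr (-1)).getD 0 else total

-- ===== PRECONDITION & SPEC =====
def Spec_oppsum (arr : List Int) (out : Int) : Prop := out = oppsum_alt arr
instance (arr : List Int) (out : Int) : Decidable (Spec_oppsum arr out) := by unfold Spec_oppsum; infer_instance

-- ===== CLAIM (what is proved, stated in full; the proofs are below) =====
def Claim_equal_oppsum : Prop := ∀ (arr : List Int), Dom_oppsum arr → Spec_oppsum arr (oppsum arr)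

-- ===== LEMMAS AND PROOFS =====

-- ===== VERDICT (by name: the statement is the Claim_ definition above) =====
def pvAlt2 : List Int → Int
  | [] => 0
  | [a] => -a
  | a :: b :: rest => b - a + pvAlt2 rest

theorem pyGet_neg_one_eq_getLast? (xs : List Int) :
    PySem.List.pyGet? xs (-1) = xs.getLast? := by
  cases xs with
  | nil => simp [PySem.List.pyGet?, PySem.List.pyIdx?]
  | cons a l =>
      simp [PySem.List.pyGet?, PySem.List.pyIdx?, List.getLast?_eq_getElem?]

theorem oppsum_alt_eq_pvAlt2 (arr : List Int) : oppsum_alt arr = pvAlt2 arr := by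
  induction arr using pvAlt2.induct with
  | case1 => rfl
  | case2 a =>
      simp [oppsum_alt, pvPairs, pvAlt2, pyGet_neg_one_eq_getLast?]
  | case3 a b rest ih =>
      have hL : (a :: b :: rest).length % 2 = rest.length % 2 := by
        simp only [List.length_cons]; omega
      by_cases h1 : rest.length % 2 = 1
      · have h2 : (a :: b :: rest).length % 2 = 1 := by rw [hL]; exact h1
        have hne : rest ≠ [] := by intro h0; subst h0; simp at h1
        simp only [oppsum_alt, pvPairs, List.map_cons, List.sum_cons] at ih ⊢
        rw [if_pos h2, if_pos h1] at *
        rw [pyGet_neg_one_eq_getLast?] at ih ⊢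
        obtain ⟨c, rest', rfl⟩ := List.exists_cons_of_ne_nil hne
        rw [List.getLast?_cons_cons, List.getLast?_cons_cons, pvAlt2, ← ih]
        ring
      · have h2 : (a :: b :: rest).length % 2 ≠ 1 := by rw [hL]; exact h1
        simp only [oppsum_alt, pvPairs, List.map_cons, List.sum_cons] at ih ⊢
        rw [if_neg h2, if_neg h1] at *
        rw [pvAlt2, ← ih]

theorem oppsumLoop_false (arr : List Int) : ∀ count : Int,
    oppsumLoop arr false count = count + pvAlt2 arr := by
  induction arr using pvAlt2.induct with
  | case1 => intro count; simp [oppsumLoop, pvAlt2]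
  | case2 a => intro count; simp [oppsumLoop, pvAlt2]; ring
  | case3 a b rest ih =>
      intro count
      simp [oppsumLoop, pvAlt2, ih]
      ring

theorem oppsum_spec : Claim_equal_oppsum := by
  intro arr _
  unfold Spec_oppsum oppsum
  rw [oppsumLoop_false, oppsum_alt_eq_pvAlt2]
  ring
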